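-- pv_equiv track=rewrite | github.com/thersee/AdventOfCode | 2023/14/14b.py | findLargestMin
-- ===== SOURCE A (Python) =====
-- def findLargestMin(row, listOfStops):
--     smallest = 0
--     for stop in listOfStops:
--         if stop < row:
--             smallest = stop
--         elif stop > row:
--             return smallest +1
--     return smallest +1
-- ===== SOURCE B (Python) =====
-- def findLargestMin(row, listOfStops):
--     # Cut the list at the first stop above row, then take the last stop below row
--     # in that prefix (default 0), plus one.
--     cut = next((i for i, s in enumerate(listOfStops) if s > row), len(listOfStops))
--     smaller = [s for s in listOfStops[:cut] if s < row]
--     return (smaller[-1] if smaller else 0) + 1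
-- ===== Notes on version B (the rewrite author's own statement) =====
-- stated objective: alternative
-- what changed: Replaces A's single accumulator loop with early return by a declarative decomposition: find the cut index of the first stop above row, filter the prefix for stops below row, and return its last element (default 0) plus one.
import Mathlib
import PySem

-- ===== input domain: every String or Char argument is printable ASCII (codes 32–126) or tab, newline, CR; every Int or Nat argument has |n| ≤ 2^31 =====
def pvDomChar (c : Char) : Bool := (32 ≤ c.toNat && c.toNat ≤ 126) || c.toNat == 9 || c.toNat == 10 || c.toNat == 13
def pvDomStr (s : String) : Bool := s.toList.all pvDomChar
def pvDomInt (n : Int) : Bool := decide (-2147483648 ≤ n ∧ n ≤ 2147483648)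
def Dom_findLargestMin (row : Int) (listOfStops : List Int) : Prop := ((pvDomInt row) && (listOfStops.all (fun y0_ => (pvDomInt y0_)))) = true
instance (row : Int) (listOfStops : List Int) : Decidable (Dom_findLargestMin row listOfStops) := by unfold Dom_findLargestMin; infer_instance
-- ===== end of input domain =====

-- B differs from A only in structure (cut index + filtered prefix instead of an accumulator loop); same value everywhere.

-- ===== PORT A =====
-- the for-loop of A: state is 'smallest'; the elif branch is the early return
def findLargestMinGo (row : Int) (smallest : Int) : List Int → Int
  | [] => smallest + 1
  | stop :: rest =>
    if stop < row then findLargestMinGo row stop rest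
    else if stop > row then smallest + 1
    else findLargestMinGo row smallest rest

def findLargestMin (row : Int) (listOfStops : List Int) : Int :=
  findLargestMinGo row 0 listOfStops

-- ===== PORT B =====
-- next(enumerate …) ported as findIdx?, the slice as take, the comprehension as filter, smaller[-1] as getLast?
def findLargestMin_alt (row : Int) (listOfStops : List Int) : Int :=
  let cut := (listOfStops.findIdx? (fun s => row < s)).getD listOfStops.length
  let smaller := (listOfStops.take cut).filter (fun s => s < row)
  (smaller.getLast?.getD 0) + 1

-- ===== PRECONDITION & SPEC =====
def Spec_findLargestMin (row : Int) (listOfStops : List Int) (out : Int) : Prop := out = findLargestMin_alt row listOfStops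
instance (row : Int) (listOfStops : List Int) (out : Int) : Decidable (Spec_findLargestMin row listOfStops out) := by unfold Spec_findLargestMin; infer_instance

-- ===== CLAIM (what is proved, stated in full; the proofs are below) =====
def Claim_equal_findLargestMin : Prop := ∀ (row : Int) (listOfStops : List Int), Dom_findLargestMin row listOfStops → Spec_findLargestMin row listOfStops (findLargestMin row listOfStops)

-- ===== LEMMAS AND PROOFS =====

-- B's "cut then take" is takeWhile (· ≤ row)
theorem take_findIdx_eq_takeWhile (row : Int) (xs : List Int) :
    xs.take ((xs.findIdx? (fun s => row < s)).getD xs.length)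
      = xs.takeWhile (fun s => s ≤ row) := by
  induction xs with
  | nil => rfl
  | cons x xs ih =>
    by_cases h : row < x
    · simp [List.findIdx?_cons, h, not_le.mpr h]
    · have hx : x ≤ row := not_lt.mp h
      cases hfi : xs.findIdx? (fun s => row < s) with
      | none =>
        simp [List.findIdx?_cons, h, hfi, hx]
        simpa [hfi] using ih
      | some i =>
        simp [List.findIdx?_cons, h, hfi, hx]
        simpa [hfi] using ih

-- A's loop computes "last element < row of the ≤-row prefix, defaulting to the accumulator, plus one"
theorem findLargestMinGo_eq (row : Int) (xs : List Int) : ∀ (smallest : Int),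
    findLargestMinGo row smallest xs
      = (((xs.takeWhile (fun s => s ≤ row)).filter (fun s => s < row)).getLast?.getD smallest) + 1 := by
  induction xs with
  | nil => intro smallest; rfl
  | cons x xs ih =>
    intro smallest
    by_cases hlt : x < row
    · have hle : x ≤ row := le_of_lt hlt
      have : (x :: (xs.takeWhile (fun s => s ≤ row)).filter (fun s => s < row)).getLast?.getD smallest
          = ((xs.takeWhile (fun s => s ≤ row)).filter (fun s => s < row)).getLast?.getD x := by
        cases hL : ((xs.takeWhile (fun s => s ≤ row)).filter (fun s => s < row)).getLast? with
        | none =>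
          have := List.getLast?_eq_none_iff.mp hL
          simp [this]
        | some y => simp [List.getLast?_cons, hL]
      simp only [findLargestMinGo, List.takeWhile_cons, hle, decide_true,
        if_true, List.filter_cons, hlt]
      rw [ih x, ← this]
    · by_cases hgt : row < x
      · have : ¬ x ≤ row := not_le.mpr hgt
        simp [findLargestMinGo, hlt, hgt, this]
      · have hle : x ≤ row := not_lt.mp hgt
        simp only [findLargestMinGo, if_neg hgt, List.takeWhile_cons, hle,
          decide_true, if_true, List.filter_cons, hlt, decide_false]
        rw [ih smallest]
        simp

-- ===== VERDICT (by name: the statement is the Claim_ definition above) =====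
theorem findLargestMin_spec : Claim_equal_findLargestMin := by
  intro row xs _
  unfold Spec_findLargestMin
  simp only [findLargestMin, findLargestMin_alt, take_findIdx_eq_takeWhile, findLargestMinGo_eq]
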